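-- pv_equiv track=rewrite | github.com/p0lyg0n/STM-Femt-Bolt-Viwer | cmake/cpp_style.py | has_attached_comment
-- ===== SOURCE A (Python) =====
-- def is_comment_line(line: str) -> bool:
--     """Returns whether a line participates in a comment block."""
--
--     stripped = line.strip()
--     return stripped.startswith("//") or stripped.startswith("/*") or stripped.startswith("*") or stripped.endswith("*/")
--
-- def has_attached_comment(lines: list[str], zero_based_line: int) -> bool:
--     """Checks whether a declaration has a directly attached comment block."""
--
--     index = zero_based_line - 1
--     saw_comment = False
--     while index >= 0:
--         stripped = lines[index].strip()
--         if not stripped: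
--             return saw_comment
--         if is_comment_line(lines[index]):
--             saw_comment = True
--             index -= 1
--             continue
--         return False
--     return saw_comment
-- ===== SOURCE B (Python) =====
-- def is_comment_line(line: str) -> bool:
--     """Returns whether a line participates in a comment block."""
--
--     stripped = line.strip()
--     return stripped.startswith("//") or stripped.startswith("/*") or stripped.startswith("*") or stripped.endswith("*/")
--
-- def has_attached_comment(lines: list[str], zero_based_line: int) -> bool:
--     """Forward scan of the lines above with a 3-state machine, reset at blanks.
--
--     The final state classifies the block directly above the declaration:
--     EMPTY (blank line or nothing just above), GOOD (non-empty, all comment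
--     lines since the last blank), BAD (some non-comment line since the last
--     blank). Attached iff the scan ends in GOOD.
--     """
--
--     if zero_based_line <= 0:
--         return False
--     EMPTY, GOOD, BAD = 0, 1, 2
--     state = EMPTY
--     for line in lines[:zero_based_line]:
--         if not line.strip():
--             state = EMPTY
--         elif not is_comment_line(line):
--             state = BAD
--         elif state != BAD:
--             state = GOOD
--     return state == GOOD
-- ===== Notes on version B (the rewrite author's own statement) =====
-- stated objective: alternative
-- what changed: Replaces A's backward walk from the declaration with early returns by a single forward pass over the lines above using a 3-state machine (EMPTY/GOOD/BAD) that resets at blank lines; the final state classifies the block directly above.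
-- outside the precondition, e.g. on has_attached_comment(['// c'], 2): A raises IndexError, B returns True
import Mathlib
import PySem

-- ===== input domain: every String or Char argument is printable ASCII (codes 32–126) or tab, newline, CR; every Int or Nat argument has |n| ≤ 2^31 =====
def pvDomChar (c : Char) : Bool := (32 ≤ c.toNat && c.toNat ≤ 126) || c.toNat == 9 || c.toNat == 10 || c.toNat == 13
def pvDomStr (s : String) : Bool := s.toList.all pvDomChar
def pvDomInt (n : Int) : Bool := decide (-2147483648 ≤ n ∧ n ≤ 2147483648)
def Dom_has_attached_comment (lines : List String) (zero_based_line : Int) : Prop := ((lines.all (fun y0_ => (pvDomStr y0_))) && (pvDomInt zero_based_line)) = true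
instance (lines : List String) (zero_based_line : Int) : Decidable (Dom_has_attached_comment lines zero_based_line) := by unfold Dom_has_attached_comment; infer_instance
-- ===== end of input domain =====

-- B replaces A's backward scan with a forward 3-state machine over the lines above; same cost, different traversal.

-- ===== PORT A =====
def is_comment_line (line : String) : Bool :=
  let stripped := PySem.Str.strip line
  PySem.Str.startswith stripped "//" || PySem.Str.startswith stripped "/*" ||
    PySem.Str.startswith stripped "*" || PySem.Str.endswith stripped "*/"

-- A's while loop; n = index + 1 (number of remaining iterations).
-- lines.getD n "" is in range on every input admitted by Pre_ (Python raises IndexError out of range).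
def hacLoop (lines : List String) : Nat → Bool → Bool
  | 0, saw => saw
  | n+1, saw =>
    let stripped := PySem.Str.strip (lines.getD n "")
    if stripped = "" then saw
    else if is_comment_line (lines.getD n "") then hacLoop lines n true
    else false

def has_attached_comment (lines : List String) (zero_based_line : Int) : Bool :=
  hacLoop lines zero_based_line.toNat false

-- ===== PORT B =====
-- Source B's for-loop body: state codes EMPTY=0, GOOD=1, BAD=2.
def hacStep (state : Nat) (line : String) : Nat :=
  if PySem.Str.strip line = "" then 0
  else if !is_comment_line line then 2
  else if state ≠ 2 then 1
  else state

def has_attached_comment_alt (lines : List String) (zero_based_line : Int) : Bool :=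
  if zero_based_line ≤ 0 then false
  else ((lines.take zero_based_line.toNat).foldl hacStep 0) == 1

-- ===== PRECONDITION & SPEC =====
-- A raises IndexError when zero_based_line - 1 is at or beyond the end of lines; exactly those inputs are excluded.
def Pre_has_attached_comment (lines : List String) (zero_based_line : Int) : Prop :=
  zero_based_line ≤ lines.length
instance (lines : List String) (zero_based_line : Int) : Decidable (Pre_has_attached_comment lines zero_based_line) := by unfold Pre_has_attached_comment; infer_instance

def pvWitness_has_attached_comment : List String × Int := (["// comment", "int x;"], 1)

def Spec_has_attached_comment (lines : List String) (zero_based_line : Int) (out : Bool) : Prop := out = has_attached_comment_alt lines zero_based_line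
instance (lines : List String) (zero_based_line : Int) (out : Bool) : Decidable (Spec_has_attached_comment lines zero_based_line out) := by unfold Spec_has_attached_comment; infer_instance

-- ===== CLAIM (what is proved, stated in full; the proofs are below) =====
def Claim_equal_has_attached_comment : Prop := ∀ (lines : List String) (zero_based_line : Int), Dom_has_attached_comment lines zero_based_line → Pre_has_attached_comment lines zero_based_line → Spec_has_attached_comment lines zero_based_line (has_attached_comment lines zero_based_line)

-- ===== LEMMAS AND PROOFS =====

-- Trailing non-blank block of a list (the contiguous non-blank lines at its end).
def trailBlock (L : List String) : List String :=
  L.reverse.takeWhile (fun l => PySem.Str.strip l != "")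

-- A's loop, rephrased as a scan over the reversed prefix (proof-only helper).
def goA : List String → Bool → Bool
  | [], saw => saw
  | x :: xs, saw =>
    if PySem.Str.strip x = "" then saw
    else if is_comment_line x then goA xs true
    else false

theorem goA_eq (L : List String) (saw : Bool) :
    goA L saw =
      (let B := L.takeWhile (fun l => PySem.Str.strip l != "")
       if B.isEmpty then saw else B.all is_comment_line) := by
  induction L generalizing saw with
  | nil => simp [goA]
  | cons x xs ih =>
    simp only [goA]
    by_cases hx : PySem.Str.strip x = ""
    · simp [hx]
    · by_cases hc : is_comment_line x
      · rw [if_neg hx, if_pos hc, ih]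
        simp only [List.takeWhile_cons, bne_iff_ne, ne_eq, hx, not_false_eq_true,
          decide_true, if_true, List.isEmpty_cons, List.all_cons, hc, Bool.true_and]
        cases h : (List.takeWhile (fun l => PySem.Str.strip l != "") xs).isEmpty
        · simp
        · simp [List.isEmpty_iff.mp h]
      · simp [hx, hc, List.all_cons]

theorem hacLoop_eq_goA (lines : List String) :
    ∀ n, n ≤ lines.length → ∀ saw,
      hacLoop lines n saw = goA ((lines.take n).reverse) saw := by
  intro n
  induction n with
  | zero => intro _ saw; simp [hacLoop, goA]
  | succ m ih =>
    intro h saw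
    have hm : m < lines.length := by omega
    have htake : lines.take (m+1) = lines.take m ++ [lines[m]] :=
      List.take_succ_eq_append_getElem hm
    have hget : lines.getD m "" = lines[m] := List.getD_eq_getElem lines "" hm
    simp only [hacLoop, hget, htake, List.reverse_append, List.reverse_singleton,
      List.singleton_append, goA]
    split
    · rfl
    · split
      · exact ih (by omega) true
      · rfl

-- B's forward state machine computes the classification of the trailing block.
theorem foldl_hacStep_eq (L : List String) :
    L.foldl hacStep 0 =
      (if (trailBlock L).isEmpty then 0
       else if (trailBlock L).all is_comment_line then 1 else 2) := by
  induction L using List.reverseRecOn with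
  | nil => simp [trailBlock]
  | append_singleton L x ih =>
    have htb : trailBlock (L ++ [x]) =
        (if PySem.Str.strip x = "" then ([] : List String) else x :: trailBlock L) := by
      simp only [trailBlock, List.reverse_append, List.reverse_singleton,
        List.singleton_append, List.takeWhile_cons]
      by_cases hx : PySem.Str.strip x = "" <;> simp [hx]
    rw [List.foldl_append, List.foldl_cons, List.foldl_nil, ih, htb]
    by_cases hx : PySem.Str.strip x = ""
    · simp [hacStep, hx]
    · by_cases hc : is_comment_line x
      · simp only [hacStep, hx, if_neg hx, hc, Bool.not_true, if_pos, if_neg,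
          Bool.false_eq_true, if_false]
        cases h : (trailBlock L).isEmpty
        · by_cases ha : (trailBlock L).all is_comment_line = true <;>
            simp [h, ha, hc, List.all_cons]
        · have he : trailBlock L = [] := List.isEmpty_iff.mp h
          simp [h, hc, he, List.all_cons]
      · simp [hacStep, hx, hc, List.all_cons]

-- ===== VERDICT (by name: the statement is the Claim_ definition above) =====
theorem has_attached_comment_spec : Claim_equal_has_attached_comment := by
  intro lines z _ hpre
  unfold Spec_has_attached_comment has_attached_comment has_attached_comment_alt
  by_cases hz : z ≤ 0
  · have : z.toNat = 0 := by omega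
    simp [this, hz, hacLoop]
  · have hle : z.toNat ≤ lines.length := by
      unfold Pre_has_attached_comment at hpre; omega
    rw [hacLoop_eq_goA lines z.toNat hle false, goA_eq, if_neg hz, foldl_hacStep_eq]
    show _ = ((if (trailBlock (lines.take z.toNat)).isEmpty then 0
       else if (trailBlock (lines.take z.toNat)).all is_comment_line then 1 else 2) == 1)
    simp only [trailBlock]
    split
    · simp_all
    · split <;> simp_all
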